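-- pv_equiv track=rewrite | github.com/macfreek/puzzle-code | permutations.py | uniqueCombinations
-- ===== SOURCE A (Python) =====
-- def uniqueCombinations(items, n):
--     """uniqueCombinations takes an unordered set of n distinct elements from the sequence.
--     combination without replacement
--     Example: Unique Combinations of 2 letters from 'ABCD':
--     AB AC AD BC BD CD
--     uniqueCombinations() is similar to itertools.combinations(), but is guaranteed to
--     work for infinite iterators.
--     For example, an iteration of 3-dimensional integers yields
--     (1,2,3) (1,2,4) (1,3,4) (2,3,4) (1,2,5) (1,3,5) (2,3,5) (1,4,5) (2,4,5) (3,4,5) ...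
--     Compare this to itertools.combinations(), which would yield
--     (1,2,3) (1,2,4) (1,2,5) (1,2,6) (1,2,7) .... and never reach e.g. (1,3,4).
--     """
--     if n==0:
--         yield []
--     else:
--         saved = []
--         for item in items:
--             for cc in uniqueCombinations(saved, n-1):
--                 yield cc+[item]
--             saved.append(item)
-- ===== SOURCE B (Python) =====
-- def uniqueCombinations(items, n):
--     """Iterative bottom-up generation: keep per-size lists of combinations seen
--     so far and extend them with each new item, yielding size-n ones lazily."""
--     if n == 0:
--         yield []
--         return
--     levels = [[[]]]
--     for item in items:
--         for k in range(min(n, len(levels)), 0, -1):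
--             new = [c + [item] for c in levels[k - 1]]
--             if k == n:
--                 yield from new
--             if k == len(levels):
--                 levels.append(new)
--             else:
--                 levels[k].extend(new)
-- ===== Notes on version B (the rewrite author's own statement) =====
-- stated objective: alternative
-- what changed: Replaced A's recursive generator (which recursively re-enumerates combinations of the saved prefix for every new item) by an iterative bottom-up scheme that maintains one list of already-built combinations per size and extends them with each incoming item, yielding size-n combinations in the same diagonal order.
import Mathlib
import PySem

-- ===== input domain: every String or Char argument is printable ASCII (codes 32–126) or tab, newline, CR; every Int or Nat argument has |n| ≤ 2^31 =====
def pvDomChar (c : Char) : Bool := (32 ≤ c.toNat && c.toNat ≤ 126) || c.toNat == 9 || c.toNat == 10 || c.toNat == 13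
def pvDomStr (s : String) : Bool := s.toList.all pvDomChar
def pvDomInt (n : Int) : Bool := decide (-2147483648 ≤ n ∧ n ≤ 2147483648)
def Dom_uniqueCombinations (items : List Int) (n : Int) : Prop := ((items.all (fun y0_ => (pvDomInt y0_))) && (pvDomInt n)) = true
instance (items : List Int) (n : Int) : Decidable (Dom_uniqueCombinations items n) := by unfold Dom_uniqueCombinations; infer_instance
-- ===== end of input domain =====

-- B replaces A's recursive generator by an iterative bottom-up scheme that keeps one list of
-- combinations per size and extends them item by item (objective: alternative decomposition,
-- same diagonal output order; both Pythons are generators, equivalence is about the yielded list).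

-- ===== PORT A =====
mutual
-- A: if n==0 yield []; else loop over items, recursing on the 'saved' prefix with n-1.
def uniqueCombinations (items : List Int) (n : Int) : List (List Int) :=
  if n = 0 then [[]] else uCLoop n [] items
termination_by (items.length, items.length + 1)
decreasing_by simp [Prod.lex_iff]

-- the 'for item in items' loop of A, carrying the growing 'saved' list
def uCLoop (n : Int) (saved : List Int) : List Int → List (List Int)
  | [] => []
  | item :: rest =>
      ((uniqueCombinations saved (n - 1)).map (fun cc => cc ++ [item])) ++
      uCLoop n (saved ++ [item]) rest
termination_by rest => (saved.length + rest.length, rest.length)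
decreasing_by all_goals simp [Prod.lex_iff] <;> omega
end

-- ===== PORT B =====
-- descending range(m, 0, -1) as a Nat list [m, m-1, …, 1]
def ksDesc (m : Nat) : List Nat := (List.range m).reverse.map (· + 1)

-- body of B's inner 'for k in range(min(n, len(levels)), 0, -1)' loop; state = (levels, yielded)
def altBody (n : Int) (x : Int) (st : List (List (List Int)) × List (List Int)) (k : Nat) :
    List (List (List Int)) × List (List Int) :=
  let newc := (st.1.getD (k - 1) []).map (fun c => c ++ [x])
  let out := if (k : Int) = n then st.2 ++ newc else st.2
  let levels := if k = st.1.length then st.1 ++ [newc]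
                else st.1.set k (st.1.getD k [] ++ newc)
  (levels, out)

-- body of B's outer 'for item in items' loop
def altStep (n : Int) (st : List (List (List Int)) × List (List Int)) (x : Int) :
    List (List (List Int)) × List (List Int) :=
  (ksDesc (min n (st.1.length : Int)).toNat).foldl (altBody n x) st

def uniqueCombinations_alt (items : List Int) (n : Int) : List (List Int) :=
  if n = 0 then [[]]
  else (items.foldl (altStep n) ([[[]]], [])).2

-- ===== PRECONDITION & SPEC =====
def Spec_uniqueCombinations (items : List Int) (n : Int) (out : List (List Int)) : Prop := out = uniqueCombinations_alt items n
instance (items : List Int) (n : Int) (out : List (List Int)) : Decidable (Spec_uniqueCombinations items n out) := by unfold Spec_uniqueCombinations; infer_instance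

-- ===== CLAIM (what is proved, stated in full; the proofs are below) =====
def Claim_equal_uniqueCombinations : Prop := ∀ (items : List Int) (n : Int), Dom_uniqueCombinations items n → Spec_uniqueCombinations items n (uniqueCombinations items n)

-- ===== LEMMAS AND PROOFS =====

lemma uC_zero (items : List Int) : uniqueCombinations items 0 = [[]] := by
  conv_lhs => unfold uniqueCombinations
  simp

lemma uC_ne (items : List Int) (n : Int) (h : n ≠ 0) :
    uniqueCombinations items n = uCLoop n [] items := by
  conv_lhs => unfold uniqueCombinations
  rw [if_neg h]

lemma uCLoop_nil_eq (n : Int) (s : List Int) : uCLoop n s [] = [] := by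
  conv_lhs => unfold uCLoop

lemma uCLoop_cons_eq (n : Int) (s : List Int) (a : Int) (t : List Int) :
    uCLoop n s (a :: t) =
      ((uniqueCombinations s (n - 1)).map (fun cc => cc ++ [a])) ++ uCLoop n (s ++ [a]) t := by
  conv_lhs => unfold uCLoop

lemma ksDesc_succ (m : Nat) : ksDesc (m + 1) = (m + 1) :: ksDesc m := by
  simp [ksDesc, List.range_succ]

lemma uCLoop_append (n : Int) (l1 l2 s : List Int) :
    uCLoop n s (l1 ++ l2) = uCLoop n s l1 ++ uCLoop n (s ++ l1) l2 := by
  induction l1 generalizing s with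
  | nil => simp [uCLoop_nil_eq]
  | cons a t ih =>
      rw [List.cons_append, uCLoop_cons_eq, uCLoop_cons_eq, ih]
      simp

lemma uCLoop_nil (m : Nat) : ∀ (rest saved : List Int) (n : Int),
    saved.length + rest.length ≤ m →
    (n < 0 ∨ ((saved.length + rest.length : Nat) : Int) < n) →
    uCLoop n saved rest = [] := by
  induction m using Nat.strong_induction_on with
  | _ m IH =>
    intro rest
    induction rest with
    | nil => intro saved n _ _; exact uCLoop_nil_eq n saved
    | cons a t iht =>
        intro saved n hle hcond
        rw [uCLoop_cons_eq]
        have h1 : uniqueCombinations saved (n - 1) = [] := by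
          have hne : n - 1 ≠ 0 := by
            rcases hcond with h | h
            · omega
            · simp at h; omega
          rw [uC_ne _ _ hne]
          have hlt : saved.length < m := by simp at hle; omega
          apply IH saved.length hlt saved [] (n - 1)
          · simp
          · rcases hcond with h | h
            · left; omega
            · right; simp at h ⊢; omega
        have h2 : uCLoop n (saved ++ [a]) t = [] := by
          apply iht (saved ++ [a]) n
          · simp at hle ⊢; omega
          · rcases hcond with h | h
            · left; exact h
            · right; simp at h ⊢; omega
        simp [h1, h2]

lemma uC_nil (items : List Int) (n : Int)
    (h : n < 0 ∨ ((items.length : Nat) : Int) < n) :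
    uniqueCombinations items n = [] := by
  have hne : n ≠ 0 := by
    rcases h with h | h
    · omega
    · have : (0:Int) ≤ ((items.length : Nat) : Int) := by positivity
      omega
  rw [uC_ne _ _ hne]
  exact uCLoop_nil items.length items [] n (by simp) (by simpa using h)

lemma uC_snoc (P : List Int) (x : Int) (n : Int) (h : n ≠ 0) :
    uniqueCombinations (P ++ [x]) n =
      uniqueCombinations P n ++ (uniqueCombinations P (n - 1)).map (fun c => c ++ [x]) := by
  rw [uC_ne _ _ h, uC_ne _ _ h, uCLoop_append]
  rw [uCLoop_cons_eq, uCLoop_nil_eq]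
  simp

lemma getD_map_range {α : Type} (f : Nat → α) (m j : Nat) (d : α) (h : j < m) :
    (((List.range m).map f).getD j d) = f j := by
  rw [List.getD_eq_getElem?_getD]
  simp [h]

-- levels after processing prefix P (for n ≥ 1): level k holds A's combinations of size k from P
def levelsOf (n : Int) (P : List Int) : List (List (List Int)) :=
  (List.range (min n.toNat P.length + 1)).map (fun k : Nat => uniqueCombinations P (k : Int))

-- the set-only phase of B's descending k-loop (no append happens for k ≤ m < length)
lemma setloop (n x : Int) (hn : 1 ≤ n) :
    ∀ (m : Nat) (L : List (List (List Int))) (out : List (List Int)), m < L.length →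
    (ksDesc m).foldl (altBody n x) (L, out) =
      (L.mapIdx (fun j lv => if 1 ≤ j ∧ j ≤ m then lv ++ ((L.getD (j - 1) []).map (fun c => c ++ [x])) else lv),
       out ++ (if 1 ≤ n.toNat ∧ n.toNat ≤ m then (L.getD (n.toNat - 1) []).map (fun c => c ++ [x]) else [])) := by
  intro m
  induction m with
  | zero =>
      intro L out _
      have h1 : ¬ (1 ≤ n.toNat ∧ n.toNat ≤ 0) := by omega
      have h2 : L.mapIdx (fun j lv => if 1 ≤ j ∧ j ≤ 0 then lv ++ ((L.getD (j - 1) []).map (fun c => c ++ [x])) else lv) = L := by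
        apply List.ext_getElem (by simp)
        intro i hi1 hi2
        simp only [List.getElem_mapIdx]
        have hno : ¬ (1 ≤ i ∧ i ≤ 0) := by omega
        rw [if_neg hno]
      have hks : ksDesc 0 = [] := rfl
      rw [hks, List.foldl_nil, if_neg h1, Prod.mk.injEq]
      exact ⟨h2.symm, by simp⟩
  | succ m ih =>
      intro L out hlt
      rw [ksDesc_succ, List.foldl_cons]
      have hne : ¬ (m + 1 = L.length) := by omega
      have hset : altBody n x (L, out) (m + 1) =
          (L.set (m + 1) (L.getD (m + 1) [] ++ (L.getD m []).map (fun c => c ++ [x])),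
           if ((m + 1 : Nat) : Int) = n then out ++ (L.getD m []).map (fun c => c ++ [x]) else out) := by
        simp [altBody, hne]
      rw [hset]
      rw [ih _ _ (by simp; omega)]
      rw [Prod.mk.injEq]
      refine ⟨?_, ?_⟩
      · apply List.ext_getElem (by simp)
        intro j hj1 hj2
        have hjL : j < L.length := by simpa using hj2
        simp only [List.getElem_mapIdx]
        have hgetne : ∀ i : Nat, i ≠ m + 1 →
            (L.set (m + 1) (L.getD (m + 1) [] ++ (L.getD m []).map (fun c => c ++ [x]))).getD i [] = L.getD i [] := by
          intro i hi
          have hne' : m + 1 ≠ i := fun he => hi he.symm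
          simp [List.getD_eq_getElem?_getD, List.getElem?_set_ne hne']
        by_cases hj : 1 ≤ j ∧ j ≤ m + 1
        · by_cases hjm : j ≤ m
          · rw [if_pos (And.intro hj.1 hjm), if_pos hj]
            rw [List.getElem_set_ne (by omega), hgetne (j - 1) (by omega)]
          · have hj' : j = m + 1 := by omega
            subst hj'
            rw [if_neg (by omega), if_pos hj]
            rw [List.getElem_set_self (by simpa using hlt)]
            rw [List.getD_eq_getElem L [] hlt]
            simp
        · have hj' : ¬ (1 ≤ j ∧ j ≤ m) := by omega
          rw [if_neg hj, if_neg hj']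
          rw [List.getElem_set_ne (by omega)]
      · -- out component
        by_cases hN : n.toNat ≤ m
        · have h1 : ¬ ((m + 1 : Nat) : Int) = n := by omega
          have h2 : (1 ≤ n.toNat ∧ n.toNat ≤ m) := by omega
          have h3 : (1 ≤ n.toNat ∧ n.toNat ≤ m + 1) := by omega
          rw [if_neg h1, if_pos h2, if_pos h3]
          have hne' : m + 1 ≠ n.toNat - 1 := by omega
          have e2 : (L.set (m + 1) (L.getD (m + 1) [] ++ (L.getD m []).map (fun c => c ++ [x]))).getD (n.toNat - 1) [] = L.getD (n.toNat - 1) [] := by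
            simp [List.getD_eq_getElem?_getD, List.getElem?_set_ne hne']
          rw [e2]
        · by_cases hN1 : n.toNat = m + 1
          · have h1 : ((m + 1 : Nat) : Int) = n := by omega
            have h2 : ¬ (1 ≤ n.toNat ∧ n.toNat ≤ m) := by omega
            have h3 : (1 ≤ n.toNat ∧ n.toNat ≤ m + 1) := by omega
            rw [if_pos h1, if_neg h2, if_pos h3, hN1]
            simp
          · have h1 : ¬ ((m + 1 : Nat) : Int) = n := by omega
            have h2 : ¬ (1 ≤ n.toNat ∧ n.toNat ≤ m) := by omega
            have h3 : ¬ (1 ≤ n.toNat ∧ n.toNat ≤ m + 1) := by omega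
            rw [if_neg h1, if_neg h2, if_neg h3]

lemma levelsOf_getD (n : Int) (P : List Int) (j : Nat) (h : j < min n.toNat P.length + 1) :
    (levelsOf n P).getD j [] = uniqueCombinations P (j : Int) := by
  unfold levelsOf
  exact getD_map_range _ _ _ _ h

lemma levelsOf_length (n : Int) (P : List Int) :
    (levelsOf n P).length = min n.toNat P.length + 1 := by
  simp [levelsOf]

lemma levelsOf_getElem (n : Int) (P : List Int) (j : Nat) (h : j < (levelsOf n P).length) :
    (levelsOf n P)[j] = uniqueCombinations P (j : Int) := by
  simp [levelsOf]

lemma uC_cast_pred (P : List Int) (j : Nat) (hj : 1 ≤ j) :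
    uniqueCombinations P ((j : Int) - 1) = uniqueCombinations P ((j - 1 : Nat) : Int) := by
  congr 1; omega

lemma uC_snoc_nat (P : List Int) (x : Int) (j : Nat) (hj : 1 ≤ j) :
    uniqueCombinations (P ++ [x]) (j : Int) =
      uniqueCombinations P (j : Int) ++
        (uniqueCombinations P ((j - 1 : Nat) : Int)).map (fun c => c ++ [x]) := by
  rw [uC_snoc P x (j : Int) (by omega), uC_cast_pred P j hj]

lemma altStep_inv (n x : Int) (hn : 1 ≤ n) (P : List Int) :
    altStep n (levelsOf n P, uniqueCombinations P n) x =
      (levelsOf n (P ++ [x]), uniqueCombinations (P ++ [x]) n) := by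
  have hlen := levelsOf_length n P
  unfold altStep
  by_cases hcase : n.toNat ≤ P.length
  -- interior case: kmax = n.toNat < length, pure set phase
  · have hkmax : (min n ((levelsOf n P).length : Int)).toNat = n.toNat := by
      rw [hlen]; omega
    rw [hkmax]
    rw [setloop n x hn n.toNat (levelsOf n P) (uniqueCombinations P n) (by omega)]
    rw [Prod.mk.injEq]
    constructor
    · apply List.ext_getElem
      · rw [List.length_mapIdx, hlen, levelsOf_length]
        simp
        omega
      · intro j hj1 hj2
        rw [List.getElem_mapIdx]
        rw [levelsOf_getElem n P j (by simpa using hj1)]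
        rw [levelsOf_getElem n (P ++ [x]) j hj2]
        by_cases hj : 1 ≤ j ∧ j ≤ n.toNat
        · rw [if_pos hj]
          rw [levelsOf_getD n P (j - 1) (by omega)]
          rw [uC_snoc_nat P x j hj.1]
        · have hj0 : j = 0 := by
            rw [List.length_mapIdx, hlen] at hj1
            omega
          subst hj0
          rw [if_neg hj]
          simp only [Nat.cast_zero, uC_zero]
    · have hif : (1 ≤ n.toNat ∧ n.toNat ≤ n.toNat) := by omega
      rw [if_pos hif]
      rw [levelsOf_getD n P (n.toNat - 1) (by omega)]
      have h1 : ((n.toNat - 1 : Nat) : Int) = n - 1 := by omega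
      rw [h1, ← uC_snoc P x n (by omega)]
  -- growth case: kmax = length, first step appends a new top level
  · have hgt : P.length < n.toNat := by omega
    have hPn : (P.length : Int) < n := by omega
    have hkmax : (min n ((levelsOf n P).length : Int)).toNat = P.length + 1 := by
      rw [hlen]; omega
    rw [hkmax, ksDesc_succ, List.foldl_cons]
    have hLlen : (levelsOf n P).length = P.length + 1 := by rw [hlen]; omega
    have hbody : altBody n x (levelsOf n P, uniqueCombinations P n) (P.length + 1) =
        (levelsOf n P ++ [((levelsOf n P).getD P.length []).map (fun c => c ++ [x])],
         if ((P.length + 1 : Nat) : Int) = n then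
           uniqueCombinations P n ++ ((levelsOf n P).getD P.length []).map (fun c => c ++ [x])
         else uniqueCombinations P n) := by
      simp [altBody, hLlen]
    rw [hbody]
    rw [setloop n x hn P.length _ _ (by simp [hLlen])]
    have hgetP : (levelsOf n P).getD P.length [] = uniqueCombinations P (P.length : Int) := by
      rw [levelsOf_getD n P P.length (by omega)]
    rw [Prod.mk.injEq]
    constructor
    · apply List.ext_getElem
      · rw [List.length_mapIdx, List.length_append, hLlen, levelsOf_length]
        simp
        omega
      · intro j hj1 hj2
        rw [List.getElem_mapIdx]
        rw [levelsOf_getElem n (P ++ [x]) j hj2]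
        have hjlt : j < P.length + 2 := by
          rw [List.length_mapIdx, List.length_append, hLlen] at hj1
          simp at hj1
          omega
        by_cases hj : 1 ≤ j ∧ j ≤ P.length
        · rw [if_pos hj]
          have e1 : (levelsOf n P ++ [((levelsOf n P).getD P.length []).map (fun c => c ++ [x])])[j]'(by simpa using hj1) = (levelsOf n P)[j]'(by rw [hLlen]; omega) := by
            rw [List.getElem_append_left (by rw [hLlen]; omega)]
          have e2 : (levelsOf n P ++ [((levelsOf n P).getD P.length []).map (fun c => c ++ [x])]).getD (j - 1) [] = (levelsOf n P).getD (j - 1) [] := by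
            have hjb : j - 1 < (levelsOf n P).length := by rw [hLlen]; omega
            simp [List.getD_eq_getElem?_getD, List.getElem?_append_left hjb]
          rw [e1, e2]
          rw [levelsOf_getElem n P j (by rw [hLlen]; omega)]
          rw [levelsOf_getD n P (j - 1) (by omega)]
          rw [uC_snoc_nat P x j hj.1]
        · rcases Nat.lt_or_ge j 1 with hj0 | hj1'
          · have hj0' : j = 0 := by omega
            subst hj0'
            rw [if_neg hj]
            rw [List.getElem_append_left (by rw [hLlen]; omega)]
            rw [levelsOf_getElem n P 0 (by rw [hLlen]; omega)]
            norm_num [uC_zero]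
          · have hjtop : j = P.length + 1 := by omega
            subst hjtop
            rw [if_neg hj]
            have e3 : (levelsOf n P ++ [((levelsOf n P).getD P.length []).map (fun c => c ++ [x])])[P.length + 1]'(by simp [hLlen]) = ((levelsOf n P).getD P.length []).map (fun c => c ++ [x]) := by
              rw [List.getElem_append_right (by omega)]
              simp [hLlen]
            rw [e3, hgetP]
            rw [uC_snoc_nat P x (P.length + 1) (by omega)]
            have hnil : uniqueCombinations P ((P.length + 1 : Nat) : Int) = [] := by
              apply uC_nil
              right
              push_cast
              omega
            rw [hnil]
            simp
    · have hif : ¬ (1 ≤ n.toNat ∧ n.toNat ≤ P.length) := by omega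
      rw [if_neg hif, List.append_nil]
      by_cases heq : ((P.length + 1 : Nat) : Int) = n
      · rw [if_pos heq, hgetP]
        have h1 : ((P.length : Nat) : Int) = n - 1 := by omega
        rw [h1, ← uC_snoc P x n (by omega)]
      · rw [if_neg heq]
        have hA1 : uniqueCombinations P n = [] := by
          apply uC_nil; right; exact hPn
        have hA2 : uniqueCombinations (P ++ [x]) n = [] := by
          apply uC_nil
          right
          simp only [List.length_append, List.length_cons, List.length_nil]
          push_cast at heq ⊢
          clear hkmax hlen
          omega
        rw [hA1, hA2]

lemma alt_neg (n : Int) (hneg : n < 0) (items : List Int) :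
    ∀ st : List (List (List Int)) × List (List Int),
      items.foldl (altStep n) st = st := by
  induction items with
  | nil => intro st; rfl
  | cons a t ih =>
      intro st
      rw [List.foldl_cons]
      have h1 : altStep n st a = st := by
        have h2 : (min n (st.1.length : Int)).toNat = 0 := by
          apply Int.toNat_of_nonpos
          exact le_trans (min_le_left _ _) (by omega)
        simp [altStep, h2, ksDesc]
      rw [h1, ih]

lemma alt_inv (n : Int) (hn : 1 ≤ n) (items : List Int) :
    items.foldl (altStep n) ([[[]]], []) = (levelsOf n items, uniqueCombinations items n) := by
  induction items using List.reverseRecOn with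
  | nil =>
      have h0 : levelsOf n [] = [[[]]] := by
        unfold levelsOf; simp [List.range_succ, uC_zero]
      have h1 : uniqueCombinations [] n = [] := by
        rw [uC_ne _ _ (by omega), uCLoop_nil_eq]
      simp [h0, h1]
  | append_singleton P x ih =>
      rw [List.foldl_append, ih, List.foldl_cons, List.foldl_nil]
      exact altStep_inv n x hn P

-- ===== VERDICT (by name: the statement is the Claim_ definition above) =====
theorem uniqueCombinations_spec : Claim_equal_uniqueCombinations := by
  intro items n _
  unfold Spec_uniqueCombinations uniqueCombinations_alt
  by_cases h0 : n = 0
  · subst h0; simp [uC_zero]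
  · rw [if_neg h0]
    by_cases hneg : n < 0
    · have hA : uniqueCombinations items n = [] := uC_nil items n (Or.inl hneg)
      rw [alt_neg n hneg items, hA]
    · have hn : 1 ≤ n := by omega
      rw [alt_inv n hn items]
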